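-- pv_equiv track=rewrite | github.com/possible055/relace-mcp | src/relace_mcp/tools/search/_impl/bash_security.py | _check_git_dangerous_flags
-- ===== SOURCE A (Python) =====
-- _GIT_BLOCKED_FLAGS = frozenset(
--     {
--         # Can invoke external diff/textconv drivers depending on repo config.
--         "--ext-diff",
--         "--textconv",
--         "--no-index",
--         # `git log -p` is effectively a diff/show escape hatch.
--         "-p",
--         "--patch",
--     }
-- )
--
-- def _check_git_dangerous_flags(tokens: list[str], base_cmd: str) -> tuple[bool, str]:
--     if base_cmd != "git":
--         return False, ""
--
--     for token in tokens[1:]: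
--         # Exact match for long flags and standalone short flags
--         if token in _GIT_BLOCKED_FLAGS:
--             return True, f"Blocked git flag: {token}"
--         # Handle combined short options (e.g., -pS, -Sp decompose to -p -S)
--         # Only single-dash tokens that aren't long flags
--         if token.startswith("-") and not token.startswith("--") and len(token) > 2:
--             for blocked in _GIT_BLOCKED_FLAGS:
--                 # Only check single-char short flags (e.g., "-p")
--                 if blocked.startswith("-") and not blocked.startswith("--") and len(blocked) == 2:
--                     if blocked[1] in token[1:]:
--                         return True, f"Blocked git flag: {blocked} (in combined option {token})"
--
--     return False, ""
-- ===== SOURCE B (Python) =====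
-- _GIT_BLOCKED_FLAGS = frozenset(
--     {
--         "--ext-diff",
--         "--textconv",
--         "--no-index",
--         "-p",
--         "--patch",
--     }
-- )
--
-- # Map from a blocked short-flag letter to its full flag, precomputed once.
-- _SHORT_FLAG_MAP = {
--     f[1]: f
--     for f in _GIT_BLOCKED_FLAGS
--     if f.startswith("-") and not f.startswith("--") and len(f) == 2
-- }
--
--
-- def _check_git_dangerous_flags(tokens: list[str], base_cmd: str) -> tuple[bool, str]:
--     if base_cmd != "git":
--         return False, ""
--
--     for token in tokens[1:]:
--         if token in _GIT_BLOCKED_FLAGS: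
--             return True, f"Blocked git flag: {token}"
--         if token.startswith("-") and not token.startswith("--") and len(token) > 2:
--             for ch in token[1:]:
--                 if ch in _SHORT_FLAG_MAP:
--                     return True, (
--                         f"Blocked git flag: {_SHORT_FLAG_MAP[ch]} "
--                         f"(in combined option {token})"
--                     )
--
--     return False, ""
-- ===== Notes on version B (the rewrite author's own statement) =====
-- stated objective: idiomatic
-- what changed: The combined-option check now loops over the token's characters and looks each up in a precomputed letter-to-flag dict, instead of scanning the whole blocked-flag set with a substring test per flag.
import Mathlib
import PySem

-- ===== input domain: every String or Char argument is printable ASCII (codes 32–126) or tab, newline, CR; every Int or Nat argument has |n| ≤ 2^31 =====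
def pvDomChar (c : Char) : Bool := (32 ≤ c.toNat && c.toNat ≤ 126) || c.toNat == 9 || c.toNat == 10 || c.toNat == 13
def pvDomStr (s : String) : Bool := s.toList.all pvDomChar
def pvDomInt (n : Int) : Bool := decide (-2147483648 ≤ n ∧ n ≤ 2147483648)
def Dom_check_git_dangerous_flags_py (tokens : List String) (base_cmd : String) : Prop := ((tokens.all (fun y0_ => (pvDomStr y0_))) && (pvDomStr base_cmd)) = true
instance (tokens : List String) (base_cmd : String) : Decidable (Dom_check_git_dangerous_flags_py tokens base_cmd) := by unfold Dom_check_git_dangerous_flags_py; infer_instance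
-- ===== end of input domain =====

-- B replaces A's inner scan of the flag set with a precomputed letter→flag map and a loop
-- over the token's characters (idiomatic; same cost).

-- ===== PORT A =====
def gitBlockedFlags : List String := ["--ext-diff", "--textconv", "--no-index", "-p", "--patch"]

-- A's inner loop: 'for blocked in _GIT_BLOCKED_FLAGS: …' inside the combined-option branch
def aInner (token : String) : List String → Option (Bool × String)
  | [] => none
  | blocked :: rest =>
    if PySem.Str.startswith blocked "-" && !PySem.Str.startswith blocked "--"
        && (PySem.Str.len blocked == 2) then
      match PySem.Str.pyGet? blocked 1 with  -- blocked[1]; in range under the len == 2 guard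
      | some c =>
        if PySem.Str.isIn (String.ofList [c]) (PySem.Str.slice token (some 1) none) then
          some (true, "Blocked git flag: " ++ blocked ++ " (in combined option " ++ token ++ ")")
        else aInner token rest
      | none => aInner token rest
    else aInner token rest

-- A's outer loop over tokens[1:]
def aLoop : List String → Bool × String
  | [] => (false, "")
  | token :: rest =>
    if gitBlockedFlags.contains token then
      (true, "Blocked git flag: " ++ token)
    else if PySem.Str.startswith token "-" && !PySem.Str.startswith token "--"
        && decide ((2 : Int) < PySem.Str.len token) then
      match aInner token gitBlockedFlags with
      | some r => r
      | none => aLoop rest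
    else aLoop rest

def check_git_dangerous_flags_py (tokens : List String) (base_cmd : String) : Bool × String :=
  if base_cmd ≠ "git" then (false, "")
  else aLoop (PySem.List.slice tokens (some 1) none)

-- ===== PORT B =====
-- the dict comprehension over _GIT_BLOCKED_FLAGS: {f[1]: f for f in … if short}
def shortFlagMap : PySem.Dict Char String :=
  gitBlockedFlags.foldl
    (fun d f =>
      if PySem.Str.startswith f "-" && !PySem.Str.startswith f "--"
          && (PySem.Str.len f == 2) then
        match PySem.Str.pyGet? f 1 with
        | some c => d.insert c f
        | none => d
      else d)
    PySem.Dict.empty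

-- B's inner loop: 'for ch in token[1:]' with a map lookup
def bInner (token : String) : List Char → Option (Bool × String)
  | [] => none
  | c :: rest =>
    if shortFlagMap.contains c then
      some (true, "Blocked git flag: " ++ shortFlagMap.getD c "" ++ " (in combined option " ++ token ++ ")")
    else bInner token rest

def bLoop : List String → Bool × String
  | [] => (false, "")
  | token :: rest =>
    if gitBlockedFlags.contains token then
      (true, "Blocked git flag: " ++ token)
    else if PySem.Str.startswith token "-" && !PySem.Str.startswith token "--"
        && decide ((2 : Int) < PySem.Str.len token) then
      match bInner token (PySem.Str.slice token (some 1) none).toList with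
      | some r => r
      | none => bLoop rest
    else bLoop rest

def check_git_dangerous_flags_py_alt (tokens : List String) (base_cmd : String) : Bool × String :=
  if base_cmd ≠ "git" then (false, "")
  else bLoop (PySem.List.slice tokens (some 1) none)

-- ===== PRECONDITION & SPEC =====
def Spec_check_git_dangerous_flags_py (tokens : List String) (base_cmd : String) (out : Bool × String) : Prop := out = check_git_dangerous_flags_py_alt tokens base_cmd
instance (tokens : List String) (base_cmd : String) (out : Bool × String) : Decidable (Spec_check_git_dangerous_flags_py tokens base_cmd out) := by unfold Spec_check_git_dangerous_flags_py; infer_instance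

-- ===== CLAIM (what is proved, stated in full; the proofs are below) =====
def Claim_equal_check_git_dangerous_flags_py : Prop := ∀ (tokens : List String) (base_cmd : String), Dom_check_git_dangerous_flags_py tokens base_cmd → Spec_check_git_dangerous_flags_py tokens base_cmd (check_git_dangerous_flags_py tokens base_cmd)

-- ===== LEMMAS AND PROOFS =====

-- A's inner scan of the five literal flags reduces to the single test on '-p'
lemma aInner_eq (t : String) :
    aInner t gitBlockedFlags =
      if PySem.Str.isIn "p" (PySem.Str.slice t (some 1) none) then
        some (true, "Blocked git flag: " ++ "-p" ++ " (in combined option " ++ t ++ ")")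
      else none := by
  have g1 : (PySem.Str.startswith "--ext-diff" "-" && !PySem.Str.startswith "--ext-diff" "--"
      && (PySem.Str.len "--ext-diff" == 2)) = false := by decide
  have g2 : (PySem.Str.startswith "--textconv" "-" && !PySem.Str.startswith "--textconv" "--"
      && (PySem.Str.len "--textconv" == 2)) = false := by decide
  have g3 : (PySem.Str.startswith "--no-index" "-" && !PySem.Str.startswith "--no-index" "--"
      && (PySem.Str.len "--no-index" == 2)) = false := by decide
  have g4 : (PySem.Str.startswith "-p" "-" && !PySem.Str.startswith "-p" "--"
      && (PySem.Str.len "-p" == 2)) = true := by decide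
  have g5 : (PySem.Str.startswith "--patch" "-" && !PySem.Str.startswith "--patch" "--"
      && (PySem.Str.len "--patch" == 2)) = false := by decide
  have e : PySem.Str.pyGet? "-p" 1 = some 'p' := by decide
  have f : String.ofList ['p'] = "p" := by decide
  simp only [aInner, gitBlockedFlags, g1, g2, g3, g4, g5, e, f, Bool.false_eq_true, if_false,
    if_true]

-- B's character scan returns on the first 'p' among the scanned characters
lemma bInner_mem (t : String) (cs : List Char) :
    bInner t cs =
      if 'p' ∈ cs then
        some (true, "Blocked git flag: " ++ "-p" ++ " (in combined option " ++ t ++ ")")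
      else none := by
  induction cs with
  | nil => simp [bInner]
  | cons c rest ih =>
    by_cases hcp : c = 'p'
    · subst hcp
      simp [bInner, (by decide : shortFlagMap.contains 'p' = true),
        (by decide : shortFlagMap.getD 'p' "" = "-p")]
    · have h1 : shortFlagMap.contains c = false := by
        cases h : shortFlagMap.contains c
        · rfl
        · exfalso
          have hk := (PySem.Dict.contains_iff_mem_keys shortFlagMap c).mp h
          rw [(by decide : shortFlagMap.keys = ['p'])] at hk
          simp at hk
          exact hcp hk
      simp [bInner, h1, ih, (show ¬('p' = c) from fun hx => hcp hx.symm)]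

-- B's character scan reduces to the same test
lemma bInner_eq (t : String) :
    bInner t (PySem.Str.slice t (some 1) none).toList =
      if PySem.Str.isIn "p" (PySem.Str.slice t (some 1) none) then
        some (true, "Blocked git flag: " ++ "-p" ++ " (in combined option " ++ t ++ ")")
      else none := by
  rw [bInner_mem]
  congr 1
  rw [eq_iff_iff, PySem.Str.isIn_iff_infix,
    (by decide : "p".toList = ['p']), List.singleton_infix_iff]

lemma loop_eq (ts : List String) : aLoop ts = bLoop ts := by
  induction ts with
  | nil => rfl
  | cons t rest ih =>
    simp only [aLoop, bLoop, aInner_eq, bInner_eq]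
    split_ifs <;> simp [ih]

-- ===== VERDICT (by name: the statement is the Claim_ definition above) =====
theorem check_git_dangerous_flags_py_spec : Claim_equal_check_git_dangerous_flags_py := by
  intro tokens base_cmd _
  unfold Spec_check_git_dangerous_flags_py check_git_dangerous_flags_py check_git_dangerous_flags_py_alt
  split_ifs with h
  · rfl
  · exact loop_eq _
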